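-- pv_equiv track=rewrite | github.com/sirjordan/yamp | dices.py | score_n_of_a_kind
-- ===== SOURCE A (Python) =====
-- MIN_DICE = 1
--
-- MAX_DICE = 6
--
-- def count_equal(dices, num_to_match):
--     count = 0
--     for dice in dices:
--         if dice == num_to_match:
--             count += 1
--
--     return count
--
-- def score_n_of_a_kind(dices, n):
--     """
--     At least three/four (n) dice the same
--     :param n: 3 or 4
--     :return: Sum of all dice
--     """
--     if n != 3 and n != 4:
--         raise ValueError('Parameter "n" must be 3 or 4 to count score')
--
--     for dice_num in range(MIN_DICE, MAX_DICE + 1):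
--         n_of_kind = count_equal(dices, dice_num)
--         if n_of_kind >= n:
--             return sum(dices)
--
--     return 0
-- ===== SOURCE B (Python) =====
-- MIN_DICE = 1
--
-- MAX_DICE = 6
--
-- def score_n_of_a_kind(dices, n):
--     """
--     At least three/four (n) dice the same
--     :param n: 3 or 4
--     :return: Sum of all dice
--     """
--     if n != 3 and n != 4:
--         raise ValueError('Parameter "n" must be 3 or 4 to count score')
--
--     # Sort-then-scan: equal values are contiguous in sorted order, so one
--     # pass over the sorted dice finds a run of length >= n.
--     prev = None
--     run = 0
--     for d in sorted(dices):
--         if d == prev: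
--             run += 1
--         else:
--             prev = d
--             run = 1
--         if run >= n and MIN_DICE <= d <= MAX_DICE:
--             return sum(dices)
--     return 0
-- ===== Notes on version B (the rewrite author's own statement) =====
-- stated objective: alternative
-- what changed: Replaces the six per-value count_equal scans with a sort-then-scan: sort the dice once and detect a run of >= n equal values (restricted to 1..6) in a single pass over the sorted list.
import Mathlib
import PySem

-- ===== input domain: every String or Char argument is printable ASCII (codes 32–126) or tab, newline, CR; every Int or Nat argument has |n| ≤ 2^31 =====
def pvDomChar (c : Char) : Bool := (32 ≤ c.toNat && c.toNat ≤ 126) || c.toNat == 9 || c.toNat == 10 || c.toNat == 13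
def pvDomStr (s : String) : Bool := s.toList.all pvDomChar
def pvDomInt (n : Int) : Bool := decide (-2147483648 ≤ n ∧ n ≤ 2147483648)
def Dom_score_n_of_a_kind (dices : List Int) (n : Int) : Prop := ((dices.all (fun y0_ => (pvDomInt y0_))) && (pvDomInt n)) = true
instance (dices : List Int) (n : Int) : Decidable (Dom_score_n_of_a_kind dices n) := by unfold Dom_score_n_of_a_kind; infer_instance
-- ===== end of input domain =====

-- B sorts the dice once and scans the sorted list for a run of >= n equal values in 1..6,
-- replacing A's six count_equal passes (alternative algorithm, same result).

-- ===== PORT A =====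
-- count_equal: A's explicit counting loop
def count_equal (dices : List Int) (num_to_match : Int) : Int :=
  dices.foldl (fun count dice => if dice == num_to_match then count + 1 else count) 0

-- the early-return for-loop over range(MIN_DICE, MAX_DICE + 1)
def scoreLoopA (dices : List Int) (n : Int) : List Int → Int
  | [] => 0
  | v :: rest =>
      if count_equal dices v ≥ n then dices.sum else scoreLoopA dices n rest

def score_n_of_a_kind (dices : List Int) (n : Int) : Int :=
  -- n ≠ 3 ∧ n ≠ 4 raises ValueError in Python; excluded by Pre_ (value here unconstrained)
  if n ≠ 3 ∧ n ≠ 4 then 0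
  else scoreLoopA dices n (PySem.List.pyRange 1 7 1)

-- ===== PORT B =====
-- the for-loop over sorted(dices): prev/run state, early return on a run of length >= n
def runLoopB (dices : List Int) (n : Int) : Option Int → Int → List Int → Int
  | _, _, [] => 0
  | prev, run, d :: t =>
      let run' : Int := if prev = some d then run + 1 else 1
      if run' ≥ n ∧ 1 ≤ d ∧ d ≤ 6 then dices.sum
      else runLoopB dices n (some d) run' t

def score_n_of_a_kind_alt (dices : List Int) (n : Int) : Int :=
  -- same ValueError guard, excluded by Pre_
  if n ≠ 3 ∧ n ≠ 4 then 0
  else runLoopB dices n none 0 (PySem.List.sorted dices (fun x => x) false)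

-- ===== PRECONDITION & SPEC =====
-- Pre_ excludes exactly the inputs where A (and B) raise ValueError: n not in {3, 4}.
def Pre_score_n_of_a_kind (dices : List Int) (n : Int) : Prop := n = 3 ∨ n = 4
instance (dices : List Int) (n : Int) : Decidable (Pre_score_n_of_a_kind dices n) := by unfold Pre_score_n_of_a_kind; infer_instance

def pvWitness_score_n_of_a_kind : List Int × Int := ([1, 1, 1, 5], 3)

def Spec_score_n_of_a_kind (dices : List Int) (n : Int) (out : Int) : Prop := out = score_n_of_a_kind_alt dices n
instance (dices : List Int) (n : Int) (out : Int) : Decidable (Spec_score_n_of_a_kind dices n out) := by unfold Spec_score_n_of_a_kind; infer_instance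

-- ===== CLAIM (what is proved, stated in full; the proofs are below) =====
def Claim_equal_score_n_of_a_kind : Prop := ∀ (dices : List Int) (n : Int), Dom_score_n_of_a_kind dices n → Pre_score_n_of_a_kind dices n → Spec_score_n_of_a_kind dices n (score_n_of_a_kind dices n)

-- ===== LEMMAS AND PROOFS =====

-- A's counting loop computes the list count
theorem count_equal_eq (dices : List Int) (v : Int) :
    count_equal dices v = (dices.count v : Int) := by
  unfold count_equal
  suffices h : ∀ c : Int, dices.foldl (fun count dice => if dice == v then count + 1 else count) c
      = c + (dices.count v : Int) by simpa using h 0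
  induction dices with
  | nil => intro c; simp
  | cons d rest ih =>
      intro c
      rw [List.foldl_cons]
      by_cases hd : d = v
      · rw [if_pos (by simp [hd]), ih, List.count_cons, if_pos (by simp [hd])]
        push_cast; ring
      · rw [if_neg (by simp [hd]), ih, List.count_cons, if_neg (by simp [hd])]
        simp

-- A's early-return loop equals a guarded existence check over the same list
theorem scoreLoopA_eq_any (dices : List Int) (n : Int) (l : List Int) :
    scoreLoopA dices n l =
      if ∃ v ∈ l, (dices.count v : Int) ≥ n then dices.sum else 0 := by
  induction l with
  | nil => simp [scoreLoopA]
  | cons v rest ih =>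
      simp only [scoreLoopA, count_equal_eq]
      by_cases h : (dices.count v : Int) ≥ n
      · rw [if_pos h, if_pos ⟨v, by simp, h⟩]
      · rw [if_neg h, ih]
        have hiff : (∃ w ∈ rest, (dices.count w : Int) ≥ n) ↔
            (∃ w ∈ v :: rest, (dices.count w : Int) ≥ n) := by
          constructor
          · rintro ⟨w, hw, hcw⟩
            exact ⟨w, by simp [hw], hcw⟩
          · rintro ⟨w, hw, hcw⟩
            rcases List.mem_cons.1 hw with rfl | hw'
            · exact absurd hcw h
            · exact ⟨w, hw', hcw⟩
        exact if_congr hiff rfl rfl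

-- B's run scan on a sorted tail: invariant characterisation.
-- State (some p, r): p bounds the tail below, the check for state (p, r) has already failed.
theorem runLoopB_sorted (dices : List Int) (n : Int) (l : List Int) :
    ∀ (p r : Int), l.Pairwise (· ≤ ·) → (∀ x ∈ l, p ≤ x) → ¬(r ≥ n ∧ 1 ≤ p ∧ p ≤ 6) →
    runLoopB dices n (some p) r l =
      if (1 ≤ p ∧ p ≤ 6 ∧ r + (l.count p : Int) ≥ n) ∨
         (∃ v ∈ l, 1 ≤ v ∧ v ≤ 6 ∧ (l.count v : Int) ≥ n ∧ v ≠ p)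
      then dices.sum else 0 := by
  induction l with
  | nil =>
      intro p r _ _ hpre
      rw [runLoopB, if_neg]
      rintro (⟨h1, h2, h3⟩ | ⟨v, hv, _⟩)
      · exact hpre ⟨by simpa using h3, h1, h2⟩
      · simp at hv
  | cons d t ih =>
      intro p r hsort hlb hpre
      have hst : t.Pairwise (· ≤ ·) := (List.pairwise_cons.1 hsort).2
      have hdt : ∀ x ∈ t, d ≤ x := (List.pairwise_cons.1 hsort).1
      have hpd : p ≤ d := hlb d (by simp)
      rw [runLoopB]
      by_cases hd : p = d
      · -- same value: run continues
        subst hd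
        simp only [if_true]
        have hcc : (List.count p (p :: t) : Int) = (t.count p : Int) + 1 := by
          rw [List.count_cons_self]; push_cast; ring
        have hct : (0 : Int) ≤ (t.count p : Int) := by positivity
        by_cases hc : r + 1 ≥ n ∧ 1 ≤ p ∧ p ≤ 6
        · rw [if_pos hc, if_pos]
          exact Or.inl ⟨hc.2.1, hc.2.2, by omega⟩
        · rw [if_neg hc, ih p (r + 1) hst hdt hc]
          apply if_congr _ rfl rfl
          constructor
          · rintro (⟨h1, h2, h3⟩ | ⟨v, hv, h1, h2, h3, h4⟩)
            · exact Or.inl ⟨h1, h2, by omega⟩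
            · exact Or.inr ⟨v, by simp [hv], h1, h2, by rwa [List.count_cons_of_ne (Ne.symm h4)], h4⟩
          · rintro (⟨h1, h2, h3⟩ | ⟨v, hv, h1, h2, h3, h4⟩)
            · exact Or.inl ⟨h1, h2, by omega⟩
            · rcases List.mem_cons.1 hv with rfl | hvt
              · exact absurd rfl h4
              · exact Or.inr ⟨v, hvt, h1, h2, by rwa [List.count_cons_of_ne (Ne.symm h4)] at h3, h4⟩
      · -- new value d > p: p never reappears (list is sorted)
        have hplt : p < d := lt_of_le_of_ne hpd hd
        have hcp0 : t.count p = 0 := by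
          rw [List.count_eq_zero]
          intro hmem
          exact absurd (hdt p hmem) (by omega)
        have hcpc : List.count p (d :: t) = 0 := by
          rw [List.count_cons_of_ne (Ne.symm hd), hcp0]
        have hnp : ¬((some p : Option Int) = some d) := by simpa using hd
        rw [if_neg hnp]
        have hcc : (List.count d (d :: t) : Int) = (t.count d : Int) + 1 := by
          rw [List.count_cons_self]; push_cast; ring
        have hct : (0 : Int) ≤ (t.count d : Int) := by positivity
        by_cases hc : (1 : Int) ≥ n ∧ 1 ≤ d ∧ d ≤ 6
        · rw [if_pos hc, if_pos]
          exact Or.inr ⟨d, by simp, hc.2.1, hc.2.2, by omega, Ne.symm hd⟩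
        · rw [if_neg hc, ih d 1 hst hdt hc]
          apply if_congr _ rfl rfl
          constructor
          · rintro (⟨h1, h2, h3⟩ | ⟨v, hv, h1, h2, h3, h4⟩)
            · exact Or.inr ⟨d, by simp, h1, h2, by omega, Ne.symm hd⟩
            · have hvp : v ≠ p := by have := hdt v hv; omega
              exact Or.inr ⟨v, by simp [hv], h1, h2, by rwa [List.count_cons_of_ne (Ne.symm h4)], hvp⟩
          · rintro (⟨h1, h2, h3⟩ | ⟨v, hv, h1, h2, h3, h4⟩)
            · rw [hcpc] at h3
              exact absurd ⟨by simpa using h3, h1, h2⟩ hpre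
            · rcases List.mem_cons.1 hv with rfl | hvt
              · exact Or.inl ⟨h1, h2, by omega⟩
              · by_cases hvd : v = d
                · subst hvd
                  exact Or.inl ⟨h1, h2, by omega⟩
                · exact Or.inr ⟨v, hvt, h1, h2, by rwa [List.count_cons_of_ne (Ne.symm hvd)] at h3, hvd⟩

-- B equals the same existence condition as A, stated over the original list
theorem runLoopB_eq (dices : List Int) (n : Int) (hn : n = 3 ∨ n = 4) :
    runLoopB dices n none 0 (PySem.List.sorted dices (fun x => x) false) =
      if ∃ v ∈ dices, 1 ≤ v ∧ v ≤ 6 ∧ (dices.count v : Int) ≥ n then dices.sum else 0 := by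
  have hperm : (PySem.List.sorted dices (fun x => x) false).Perm dices :=
    PySem.List.sorted_perm dices (fun x => x) false
  have hcount : ∀ v : Int, (PySem.List.sorted dices (fun x => x) false).count v = dices.count v :=
    fun v => hperm.count_eq v
  have hsort : (PySem.List.sorted dices (fun x => x) false).Pairwise (· ≤ ·) := by
    simpa using PySem.List.sorted_pairwise dices (fun x => x)
  cases hs : PySem.List.sorted dices (fun x => x) false with
  | nil =>
      rw [runLoopB, if_neg]
      rintro ⟨v, hmem, _, _, _⟩
      have hnil : dices = [] := by
        have := hperm; rw [hs] at this; exact (List.Perm.nil_eq this).symm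
      rw [hnil] at hmem; simp at hmem
  | cons d t =>
      rw [hs] at hsort hcount hperm
      have hdt : ∀ x ∈ t, d ≤ x := (List.pairwise_cons.1 hsort).1
      rw [runLoopB]
      have hnone : ¬((none : Option Int) = some d) := by simp
      rw [if_neg hnone, if_neg (by rcases hn with rfl | rfl <;> rintro ⟨h, _⟩ <;> omega)]
      rw [runLoopB_sorted dices n t d 1 (List.pairwise_cons.1 hsort).2 hdt
          (by rcases hn with rfl | rfl <;> rintro ⟨h, _⟩ <;> omega)]
      apply if_congr _ rfl rfl
      constructor
      · rintro (⟨h1, h2, h3⟩ | ⟨v, hv, h1, h2, h3, h4⟩)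
        · refine ⟨d, hperm.mem_iff.1 (by simp), h1, h2, ?_⟩
          have := hcount d; rw [List.count_cons_self] at this; omega
        · refine ⟨v, hperm.mem_iff.1 (by simp [hv]), h1, h2, ?_⟩
          have := hcount v; rw [List.count_cons_of_ne (Ne.symm h4)] at this; omega
      · rintro ⟨v, hmem, h1, h2, h3⟩
        have hvmem : v ∈ d :: t := hperm.mem_iff.2 hmem
        by_cases hvd : v = d
        · subst hvd
          have := hcount v; rw [List.count_cons_self] at this
          exact Or.inl ⟨h1, h2, by omega⟩
        · rcases List.mem_cons.1 hvmem with rfl | hvt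
          · exact absurd rfl hvd
          · have := hcount v; rw [List.count_cons_of_ne (Ne.symm hvd)] at this
            exact Or.inr ⟨v, hvt, h1, h2, by omega, hvd⟩

-- the members of range(1, 7)
theorem mem_pyRange17 (v : Int) : v ∈ PySem.List.pyRange 1 7 1 ↔ 1 ≤ v ∧ v ≤ 6 := by
  have h : PySem.List.pyRange 1 7 1 = [1, 2, 3, 4, 5, 6] := by decide
  rw [h]
  constructor
  · intro hm; fin_cases hm <;> omega
  · rintro ⟨h1, h2⟩
    interval_cases v <;> simp

-- ===== VERDICT (by name: the statement is the Claim_ definition above) =====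
theorem score_n_of_a_kind_spec : Claim_equal_score_n_of_a_kind := by
  intro dices n _ hpre
  unfold Spec_score_n_of_a_kind score_n_of_a_kind score_n_of_a_kind_alt
  have hn : ¬(n ≠ 3 ∧ n ≠ 4) := by rcases hpre with h | h <;> simp [h]
  rw [if_neg hn, if_neg hn, scoreLoopA_eq_any, runLoopB_eq dices n hpre]
  apply if_congr _ rfl rfl
  constructor
  · rintro ⟨v, hv, hc⟩
    have hr := (mem_pyRange17 v).1 hv
    refine ⟨v, ?_, hr.1, hr.2, hc⟩
    have hpos : 0 < dices.count v := by
      by_contra h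
      have h0 : dices.count v = 0 := by omega
      rw [h0] at hc
      rcases hpre with rfl | rfl <;> simp at hc
    exact List.count_pos_iff.1 hpos
  · rintro ⟨v, _, h1, h2, h3⟩
    exact ⟨v, (mem_pyRange17 v).2 ⟨h1, h2⟩, h3⟩
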